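-- pv_equiv track=rewrite | github.com/ubc-systopia/Indaleko | query/tools/recommendation/recommendation_tool.py | _is_likely_query
-- ===== SOURCE A (Python) =====
-- def _is_likely_query(message: str) -> bool:
--     """
--     Determine if a message is likely a query rather than a conversational message.
--
--     Args:
--         message: The message to analyze.
--
--     Returns:
--         bool: True if the message is likely a query, False otherwise.
--     """
--     # Define query indicators
--     query_indicators = [
--         "show me", "find", "search for", "look for", "get", "retrieve",
--         "where is", "when did", "how many", "list all", "display",
--         "what is", "who is", "which", "where are"
--     ]
--
--     # Check for question marks
--     has_question_mark = "?" in message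
--
--     # Check for query indicators
--     message_lower = message.lower()
--     has_query_indicator = any(indicator in message_lower for indicator in query_indicators)
--
--     # Check length (queries tend to be shorter)
--     is_short = len(message.split()) < 15
--
--     # Check for command-like syntax (not conversational)
--     starts_with_verb = any(message_lower.startswith(verb) for verb in [
--         "show", "find", "search", "get", "list", "display", "retrieve"
--     ])
--
--     # Calculate a score based on these factors
--     score = 0
--     if has_question_mark:
--         score += 1
--     if has_query_indicator:
--         score += 2
--     if is_short:
--         score += 1
--     if starts_with_verb:
--         score += 2
--
--     # If score is at least 2, it's likely a query
--     return score >= 2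
-- ===== SOURCE B (Python) =====
-- def _is_likely_query(message: str) -> bool:
--     """Classify a message as likely-query via a direct boolean rule
--     (equivalent to A's score>=2 weighting: either 2-point signal alone
--     suffices, else both 1-point signals are needed)."""
--     message_lower = message.lower()
--     return (
--         any(indicator in message_lower for indicator in [
--             "show me", "find", "search for", "look for", "get", "retrieve",
--             "where is", "when did", "how many", "list all", "display",
--             "what is", "who is", "which", "where are"
--         ])
--         or any(message_lower.startswith(verb) for verb in [
--             "show", "find", "search", "get", "list", "display", "retrieve"
--         ])
--         or ("?" in message and len(message.split()) < 15)
--     )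
-- ===== Notes on version B (the rewrite author's own statement) =====
-- stated objective: simpler
-- what changed: Replaced the integer score accumulator and threshold (>=2) with the algebraically equivalent direct boolean rule: query-indicator or starts-with-verb alone, or both question mark and shortness.
import Mathlib
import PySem

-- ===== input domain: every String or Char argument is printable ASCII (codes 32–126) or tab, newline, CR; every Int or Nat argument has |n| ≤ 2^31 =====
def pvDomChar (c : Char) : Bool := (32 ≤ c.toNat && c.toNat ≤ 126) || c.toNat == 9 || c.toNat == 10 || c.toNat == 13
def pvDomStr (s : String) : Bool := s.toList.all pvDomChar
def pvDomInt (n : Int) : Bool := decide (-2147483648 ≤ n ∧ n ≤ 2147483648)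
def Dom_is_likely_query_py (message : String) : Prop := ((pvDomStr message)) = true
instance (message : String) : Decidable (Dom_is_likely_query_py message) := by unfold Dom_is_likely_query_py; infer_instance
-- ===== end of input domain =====

-- B replaces A's integer score accumulator with the equivalent direct boolean rule (simpler).


-- ===== PORT A =====
def is_likely_query_py (message : String) : Bool :=
  let query_indicators : List String :=
    ["show me", "find", "search for", "look for", "get", "retrieve",
     "where is", "when did", "how many", "list all", "display",
     "what is", "who is", "which", "where are"]
  let has_question_mark := PySem.Str.isIn "?" message
  let message_lower := PySem.Str.lower message
  let has_query_indicator := query_indicators.any (fun ind => PySem.Str.isIn ind message_lower)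
  let is_short := decide ((PySem.Str.split₀ message).length < 15)
  let starts_with_verb :=
    (["show", "find", "search", "get", "list", "display", "retrieve"] : List String).any
      (fun verb => PySem.Str.startswith message_lower verb)
  let score : Int := 0
  let score := if has_question_mark then score + 1 else score
  let score := if has_query_indicator then score + 2 else score
  let score := if is_short then score + 1 else score
  let score := if starts_with_verb then score + 2 else score
  decide (score ≥ 2)

-- ===== PORT B =====
def is_likely_query_py_alt (message : String) : Bool :=
  let message_lower := PySem.Str.lower message
  ((["show me", "find", "search for", "look for", "get", "retrieve",
     "where is", "when did", "how many", "list all", "display",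
     "what is", "who is", "which", "where are"] : List String).any
      (fun indicator => PySem.Str.isIn indicator message_lower))
  || ((["show", "find", "search", "get", "list", "display", "retrieve"] : List String).any
      (fun verb => PySem.Str.startswith message_lower verb))
  || (PySem.Str.isIn "?" message && decide ((PySem.Str.split₀ message).length < 15))

-- ===== PRECONDITION & SPEC =====
def Spec_is_likely_query_py (message : String) (out : Bool) : Prop := out = is_likely_query_py_alt message
instance (message : String) (out : Bool) : Decidable (Spec_is_likely_query_py message out) := by unfold Spec_is_likely_query_py; infer_instance

-- ===== CLAIM (what is proved, stated in full; the proofs are below) =====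
def Claim_equal_is_likely_query_py : Prop := ∀ (message : String), Dom_is_likely_query_py message → Spec_is_likely_query_py message (is_likely_query_py message)

-- ===== LEMMAS AND PROOFS =====

-- ===== VERDICT (by name: the statement is the Claim_ definition above) =====
theorem is_likely_query_py_spec : Claim_equal_is_likely_query_py := by
  intro message _
  unfold Spec_is_likely_query_py is_likely_query_py is_likely_query_py_alt
  simp only []
  generalize PySem.Str.isIn "?" message = q
  generalize (["show me", "find", "search for", "look for", "get", "retrieve",
      "where is", "when did", "how many", "list all", "display",
      "what is", "who is", "which", "where are"] : List String).any
        (fun ind => PySem.Str.isIn ind (PySem.Str.lower message)) = i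
  generalize decide ((PySem.Str.split₀ message).length < 15) = s
  generalize (["show", "find", "search", "get", "list", "display", "retrieve"] : List String).any
        (fun verb => PySem.Str.startswith (PySem.Str.lower message) verb) = v
  cases q <;> cases i <;> cases s <;> cases v <;> decide
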